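-- pv_equiv track=rewrite | github.com/kimbareum/CodingTestPractice | 프로그래머스/lv2/42885. 구명보트/구명보트.py | solution
-- ===== SOURCE A (Python) =====
-- def solution(people, limit):
--     thin = sorted([i for i in people if i <= limit//2],reverse=True)
--     fat = sorted([i for i in people if i > limit//2])
--     answer = 0
--     while thin and fat:
--         if thin[-1] + fat[-1] <= limit:
--             thin.pop()
--             fat.pop()
--         else:
--             fat.pop()
--         answer += 1
--     return answer + len(thin)//2 + len(thin)%2 + len(fat)
-- ===== SOURCE B (Python) =====
-- def solution(people, limit):
--     p = sorted(people)
--     count = 0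
--     i, j = 0, len(p) - 1
--     while i <= j:
--         if p[i] + p[j] <= limit:
--             i += 1
--         j -= 1
--         count += 1
--     return count
-- ===== Notes on version B (the rewrite author's own statement) =====
-- stated objective: idiomatic
-- what changed: Replaces A's partition into thin/fat lists with pop-from-end loop and leftover arithmetic by the standard single-sorted-list two-pointer greedy (i from the light end, j from the heavy end).
import Mathlib
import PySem

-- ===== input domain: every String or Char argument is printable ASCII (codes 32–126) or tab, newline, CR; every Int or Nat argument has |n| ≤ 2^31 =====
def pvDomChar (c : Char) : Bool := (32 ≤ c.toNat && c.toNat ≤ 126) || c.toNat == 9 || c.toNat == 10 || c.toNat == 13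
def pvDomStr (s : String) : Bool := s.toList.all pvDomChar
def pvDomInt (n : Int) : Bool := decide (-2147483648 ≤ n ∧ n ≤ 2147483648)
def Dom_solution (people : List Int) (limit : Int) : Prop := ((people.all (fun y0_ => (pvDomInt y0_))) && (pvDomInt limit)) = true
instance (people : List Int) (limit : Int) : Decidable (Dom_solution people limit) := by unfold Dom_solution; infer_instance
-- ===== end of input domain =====

-- B replaces A's thin/fat partition (two sorts, pop-from-end loop, leftover arithmetic) by the
-- standard two-pointer greedy over one ascending-sorted copy of the list (idiomatic; same cost).

-- ===== PORT A =====
-- while thin and fat: compare thin[-1] + fat[-1], pop accordingly, count; returns (answer, thin, fat)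
def aLoop (limit : Int) (thin fat : List Int) (ans : Int) : Int × List Int × List Int :=
  if h : thin ≠ [] ∧ fat ≠ [] then
    if thin.getLast h.1 + fat.getLast h.2 ≤ limit then
      aLoop limit thin.dropLast fat.dropLast (ans + 1)
    else
      aLoop limit thin fat.dropLast (ans + 1)
  else (ans, thin, fat)
termination_by thin.length + fat.length
decreasing_by
  · have h1 := List.length_pos_of_ne_nil h.1
    have h2 := List.length_pos_of_ne_nil h.2
    simp [List.length_dropLast]; omega
  · have h2 := List.length_pos_of_ne_nil h.2
    simp [List.length_dropLast]; omega

def solution (people : List Int) (limit : Int) : Int :=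
  let thin := PySem.List.sorted (people.filter (fun i => decide (i ≤ PySem.Int.floordiv limit 2))) (fun x => x) true
  let fat := PySem.List.sorted (people.filter (fun i => decide (PySem.Int.floordiv limit 2 < i))) (fun x => x) false
  let r := aLoop limit thin fat 0
  r.1 + PySem.Int.floordiv (r.2.1.length : Int) 2 + PySem.Int.mod (r.2.1.length : Int) 2 + (r.2.2.length : Int)

-- ===== PORT B =====
-- while i <= j: if p[i] + p[j] <= limit: i += 1; j -= 1; count += 1  (indices are in range whenever read)
def altLoop (p : List Int) (limit : Int) (i j count : Int) : Int :=
  if i ≤ j then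
    if p.getD i.toNat 0 + p.getD j.toNat 0 ≤ limit then
      altLoop p limit (i + 1) (j - 1) (count + 1)
    else
      altLoop p limit i (j - 1) (count + 1)
  else count
termination_by (j + 1 - i).toNat
decreasing_by
  · omega
  · omega

def solution_alt (people : List Int) (limit : Int) : Int :=
  let p := PySem.List.sorted people (fun x => x) false
  altLoop p limit 0 ((p.length : Int) - 1) 0

-- ===== PRECONDITION & SPEC =====
def Spec_solution (people : List Int) (limit : Int) (out : Int) : Prop := out = solution_alt people limit
instance (people : List Int) (limit : Int) (out : Int) : Decidable (Spec_solution people limit out) := by unfold Spec_solution; infer_instance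

-- ===== CLAIM (what is proved, stated in full; the proofs are below) =====
def Claim_equal_solution : Prop := ∀ (people : List Int) (limit : Int), Dom_solution people limit → Spec_solution people limit (solution people limit)

-- ===== LEMMAS AND PROOFS =====

-- A's loop, rephrased on the reversed lists (consume heads instead of last elements), fused with
-- A's final 'answer + len(thin)//2 + len(thin)%2 + len(fat)' expression.
def raFull (limit : Int) : List Int → List Int → Int → Int
  | a :: t', f :: fd', ans =>
    if a + f ≤ limit then raFull limit t' fd' (ans + 1) else raFull limit (a :: t') fd' (ans + 1)
  | t, fd, ans => ans + (t.length : Int) / 2 + (t.length : Int) % 2 + (fd.length : Int)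

theorem raFull_nil_left (limit : Int) (fd : List Int) (ans : Int) :
    raFull limit [] fd ans = ans + (fd.length : Int) := by
  cases fd <;> simp [raFull]

theorem raFull_nil_right (limit : Int) (t : List Int) (ans : Int) :
    raFull limit t [] ans = ans + (t.length : Int) / 2 + (t.length : Int) % 2 := by
  cases t <;> simp [raFull]

theorem reverse_eq_getLast_cons (l : List Int) (h : l ≠ []) :
    l.reverse = l.getLast h :: l.dropLast.reverse := by
  conv_lhs => rw [← List.dropLast_append_getLast h]
  simp

theorem aLoop_eq (limit : Int) (thin fat : List Int) (ans : Int) :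
    (aLoop limit thin fat ans).1
      + ((aLoop limit thin fat ans).2.1.length : Int) / 2
      + ((aLoop limit thin fat ans).2.1.length : Int) % 2
      + ((aLoop limit thin fat ans).2.2.length : Int)
      = raFull limit thin.reverse fat.reverse ans := by
  induction thin, fat, ans using aLoop.induct limit with
  | case1 thin fat ans h hc ih =>
    rw [aLoop, dif_pos h, if_pos hc]
    rw [reverse_eq_getLast_cons thin h.1, reverse_eq_getLast_cons fat h.2, raFull]
    rw [if_pos hc]
    exact ih
  | case2 thin fat ans h hc ih =>
    rw [aLoop, dif_pos h, if_neg hc]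
    rw [reverse_eq_getLast_cons thin h.1, reverse_eq_getLast_cons fat h.2, raFull]
    rw [if_neg hc]
    rw [← reverse_eq_getLast_cons thin h.1]
    exact ih
  | case3 thin fat ans h =>
    rw [aLoop, dif_neg h]
    rcases not_and_or.mp h with h1 | h1 <;> simp only [not_not] at h1 <;> subst h1
    · simp [raFull_nil_left]
    · simp [raFull_nil_right]

theorem getD_append_left_eq (tA fA : List Int) (k : Nat) (hk : k < tA.length) :
    (tA ++ fA).getD k 0 = tA[k] := by
  rw [List.getD_append _ _ _ _ hk, List.getD_eq_getElem _ _ hk]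

theorem getD_append_right_eq (tA fA : List Int) (k : Nat) (hk1 : tA.length ≤ k)
    (hk2 : k - tA.length < fA.length) :
    (tA ++ fA).getD k 0 = fA[k - tA.length] := by
  rw [List.getD_append_right _ _ _ _ hk1, List.getD_eq_getElem _ _ hk2]

theorem take_succ_reverse (fA : List Int) (s : Nat) (hs : s < fA.length) :
    (fA.take (s + 1)).reverse = fA[s] :: (fA.take s).reverse := by
  rw [List.take_add_one, List.getElem?_eq_getElem hs]
  simp

theorem getD_mem_left (tA fA : List Int) (k : Nat) (hk : k < tA.length) :
    (tA ++ fA).getD k 0 ∈ tA := by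
  rw [getD_append_left_eq tA fA k hk]
  exact List.getElem_mem hk

theorem getD_mem_right (tA fA : List Int) (k : Nat) (hk1 : tA.length ≤ k)
    (hk2 : k - tA.length < fA.length) :
    (tA ++ fA).getD k 0 ∈ fA := by
  rw [getD_append_right_eq tA fA k hk1 hk2]
  exact List.getElem_mem hk2

-- thin-only phase: every remaining value is ≤ m, every pair fits, two leave per boat
theorem thinPhase (tA fA : List Int) (m limit : Int)
    (ht : ∀ x ∈ tA, x ≤ m) (hm : 2 * m ≤ limit) :
    ∀ N (i j count : Int), (j + 1 - i).toNat ≤ N → 0 ≤ i → j < (tA.length : Int) →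
      altLoop (tA ++ fA) limit i j count
        = count + (((j + 1 - i).toNat : Int)) / 2 + (((j + 1 - i).toNat : Int)) % 2 := by
  intro N
  induction N with
  | zero =>
    intro i j count hN hi hj
    rw [altLoop, if_neg (by omega)]
    omega
  | succ N ih =>
    intro i j count hN hi hj
    by_cases hij : i ≤ j
    · have hiN : i.toNat < tA.length := by omega
      have hjN : j.toNat < tA.length := by omega
      have h1 := ht _ (getD_mem_left tA fA i.toNat hiN)
      have h2 := ht _ (getD_mem_left tA fA j.toNat hjN)
      rw [altLoop, if_pos hij, if_pos (by omega)]
      rw [ih (i + 1) (j - 1) (count + 1) (by omega) (by omega) (by omega)]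
      omega
    · rw [altLoop, if_neg hij]
      omega

-- fat-only phase: every remaining value exceeds m, no pair fits, one leaves per boat
theorem fatPhase (tA fA : List Int) (m limit : Int)
    (hf : ∀ x ∈ fA, m < x) (hm : limit ≤ 2 * m + 1) :
    ∀ N (i j count : Int), (j + 1 - i).toNat ≤ N → (tA.length : Int) ≤ i →
      j < ((tA ++ fA).length : Int) →
      altLoop (tA ++ fA) limit i j count = count + ((j + 1 - i).toNat : Int) := by
  intro N
  induction N with
  | zero =>
    intro i j count hN hi hj
    rw [altLoop, if_neg (by omega)]
    omega
  | succ N ih =>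
    intro i j count hN hi hj
    simp only [List.length_append] at hj
    by_cases hij : i ≤ j
    · have hi0 : (0:Int) ≤ i := le_trans (by positivity) hi
      have h1 := hf _ (getD_mem_right tA fA i.toNat (by omega) (by omega))
      have h2 := hf _ (getD_mem_right tA fA j.toNat (by omega) (by omega))
      rw [altLoop, if_pos hij, if_neg (by omega)]
      rw [ih i (j - 1) (count + 1) (by omega) (by omega) (by simp; omega)]
      omega
    · rw [altLoop, if_neg hij]
      omega

-- main correspondence: B's two-pointer state (i, j) over tA ++ fA matches A's loop state
theorem mainPhase (tA fA : List Int) (m limit : Int)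
    (ht : ∀ x ∈ tA, x ≤ m) (hf : ∀ x ∈ fA, m < x)
    (hm1 : 2 * m ≤ limit) (hm2 : limit ≤ 2 * m + 1) :
    ∀ N (i j count : Int), (j + 1 - i).toNat ≤ N → 0 ≤ i → i ≤ (tA.length : Int) →
      (tA.length : Int) ≤ j + 1 → j < ((tA ++ fA).length : Int) →
      altLoop (tA ++ fA) limit i j count
        = raFull limit (tA.drop i.toNat) ((fA.take (j + 1 - (tA.length : Int)).toNat).reverse) count := by
  intro N
  induction N with
  | zero =>
    intro i j count hN hi hiT hTj hj
    -- measure 0 forces i = tA.length = j + 1 : both remaining regions are empty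
    rw [fatPhase tA fA m limit hf hm2 0 i j count hN (by omega) hj]
    rw [List.drop_eq_nil_of_le (by omega), raFull_nil_left]
    have h0 : (j + 1 - (tA.length : Int)).toNat = 0 := by omega
    simp [h0]
    omega
  | succ N ih =>
    intro i j count hN hi hiT hTj hj
    simp only [List.length_append] at hj
    by_cases hiTlt : i < (tA.length : Int)
    · by_cases hTjle : (tA.length : Int) ≤ j
      · -- both regions nonempty: one step, recurse
        have hiN : i.toNat < tA.length := by omega
        set s : Nat := j.toNat - tA.length with hs_def
        have hs : s < fA.length := by omega
        have hv1 : (tA ++ fA).getD i.toNat 0 = tA[i.toNat] := getD_append_left_eq _ _ _ hiN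
        have hv2 : (tA ++ fA).getD j.toNat 0 = fA[j.toNat - tA.length] :=
          getD_append_right_eq _ _ _ (by omega) hs
        have hk1 : (j + 1 - (tA.length : Int)).toNat = s + 1 := by omega
        have hd : tA.drop i.toNat = tA[i.toNat] :: tA.drop (i.toNat + 1) :=
          List.drop_eq_getElem_cons hiN
        rw [hk1, take_succ_reverse fA s hs, hd, raFull]
        by_cases hc : tA[i.toNat] + fA[s] ≤ limit
        · rw [if_pos hc, altLoop, if_pos (by omega), if_pos (by rw [hv1, hv2]; exact hc)]
          rw [ih (i + 1) (j - 1) (count + 1) (by omega) (by omega) (by omega) (by omega) (by simp; omega)]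
          have e1 : (i + 1).toNat = i.toNat + 1 := by omega
          have e2 : (j - 1 + 1 - (tA.length : Int)).toNat = s := by omega
          rw [e1, e2]
        · rw [if_neg hc, altLoop, if_pos (by omega), if_neg (by rw [hv1, hv2]; exact hc)]
          rw [ih i (j - 1) (count + 1) (by omega) (by omega) (by omega) (by omega) (by simp; omega)]
          have e2 : (j - 1 + 1 - (tA.length : Int)).toNat = s := by omega
          rw [e2, hd]
      · -- fats exhausted: thin-only tail
        rw [thinPhase tA fA m limit ht hm1 (N + 1) i j count hN hi (by omega)]
        have hk0 : (j + 1 - (tA.length : Int)).toNat = 0 := by omega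
        rw [hk0]
        simp only [List.take_zero, List.reverse_nil]
        rw [raFull_nil_right, List.length_drop]
        omega
    · -- thins exhausted: fat-only tail
      rw [fatPhase tA fA m limit hf hm2 (N + 1) i j count hN (by omega) (by simp; omega)]
      rw [List.drop_eq_nil_of_le (by omega), raFull_nil_left]
      simp only [List.length_reverse, List.length_take]
      omega

-- ===== VERDICT (by name: the statement is the Claim_ definition above) =====
theorem solution_spec : Claim_equal_solution := by
  intro people limit _
  unfold Spec_solution
  have hfd : ∀ a : Int, PySem.Int.floordiv a 2 = a / 2 :=
    fun a => PySem.Int.floordiv_eq_ediv_of_pos (by norm_num)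
  have hmd : ∀ a : Int, PySem.Int.mod a 2 = a % 2 :=
    fun a => PySem.Int.mod_eq_emod_of_pos (by norm_num)
  obtain ⟨tA, htA⟩ : ∃ t, t = PySem.List.sorted (people.filter (fun i => decide (i ≤ limit / 2))) (fun x => x) false := ⟨_, rfl⟩
  obtain ⟨fA, hfA⟩ : ∃ f, f = PySem.List.sorted (people.filter (fun i => decide (limit / 2 < i))) (fun x => x) false := ⟨_, rfl⟩
  have ht : ∀ x ∈ tA, x ≤ limit / 2 := by
    intro x hx
    rw [htA] at hx
    simp only [PySem.List.mem_sorted, List.mem_filter, decide_eq_true_eq] at hx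
    exact hx.2
  have hf : ∀ x ∈ fA, limit / 2 < x := by
    intro x hx
    rw [hfA] at hx
    simp only [PySem.List.mem_sorted, List.mem_filter, decide_eq_true_eq] at hx
    exact hx.2
  have hsplit : PySem.List.sorted people (fun x => x) false = tA ++ fA := by
    apply PySem.List.sorted_id_eq_of_perm_of_pairwise
    · have hneg : people.filter (fun x => !decide (x ≤ limit / 2))
          = people.filter (fun x => decide (limit / 2 < x)) := by
        apply List.filter_congr
        intro x _
        by_cases h : x ≤ limit / 2
        · simp [h, not_lt.mpr h]
        · simp [h, not_le.mp h]
      have h0 := List.filter_append_perm (fun i => decide (i ≤ limit / 2)) people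
      rw [hneg] at h0
      rw [htA, hfA]
      exact ((PySem.List.sorted_perm _ _ _).append (PySem.List.sorted_perm _ _ _)).trans h0
    · rw [List.pairwise_append]
      refine ⟨?_, ?_, ?_⟩
      · rw [htA]; simpa using PySem.List.sorted_pairwise _ (fun x : Int => x)
      · rw [hfA]; simpa using PySem.List.sorted_pairwise _ (fun x : Int => x)
      · exact fun a ha b hb => le_trans (ht a ha) (le_of_lt (hf b hb))
  have hrev : (PySem.List.sorted (people.filter (fun i => decide (i ≤ limit / 2))) (fun x => x) true).reverse = tA := by
    rw [htA]
    symm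
    apply PySem.List.sorted_id_eq_of_perm_of_pairwise
    · exact (List.reverse_perm _).trans (PySem.List.sorted_perm _ _ _)
    · rw [List.pairwise_reverse]
      simpa using PySem.List.sorted_pairwise_rev _ (fun x : Int => x)
  have hA : solution people limit = raFull limit tA fA.reverse 0 := by
    simp only [solution, hfd, hmd]
    rw [← hfA, aLoop_eq, hrev]
  have hB : solution_alt people limit = raFull limit tA fA.reverse 0 := by
    simp only [solution_alt]
    rw [hsplit]
    rw [mainPhase tA fA (limit / 2) limit ht hf (by omega) (by omega)
        ((tA ++ fA).length) 0 (((tA ++ fA).length : Int) - 1) 0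
        (by omega) (by omega) (by positivity)
        (by push_cast [List.length_append]; omega) (by omega)]
    have e : (((tA ++ fA).length : Int) - 1 + 1 - (tA.length : Int)).toNat = fA.length := by
      push_cast [List.length_append]
      omega
    rw [e]
    simp [List.take_length]
  rw [hA, hB]
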